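-- pv_equiv track=rewrite | github.com/onenoober/Agent_Rag-Research-Assistant | src/libs/loader/pdf_loader.py | _insert_placeholders_at_positions
-- ===== SOURCE A (Python) =====
-- from typing import Any, Dict, List, Optional, Tuple
--
-- def _insert_placeholders_at_positions(
--
--     text_content: str,
--     page_texts: List[Dict],
--     page_image_inserts: Dict[int, List[Dict]]
-- ) -> str:
--     """Insert image placeholders at the correct positions in text.
--
--     For each page, finds the end of that page's content and inserts
--     the image placeholder there.
--
--     Args:
--         text_content: Original text content.
--         page_texts: List of page text info with lengths.
--         page_image_inserts: Dict mapping page_num to list of placeholders to insert.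
--
--     Returns:
--         Modified text with placeholders inserted.
--     """
--     if not page_image_inserts or all(not v for v in page_image_inserts.values()):
--         return text_content
--
--     # Build modified text by processing page by page
--     result_parts = []
--     current_pos = 0
--
--     for page_num, page_info in enumerate(page_texts):
--         page_text = page_info["text"]
--         page_end = current_pos + len(page_text)
--
--         # Add page text
--         result_parts.append(text_content[current_pos:page_end])
--
--         # Insert image placeholders for this page
--         if page_num + 1 in page_image_inserts:
--             for insert_info in page_image_inserts[page_num + 1]:
--                 result_parts.append(f"\n{insert_info['placeholder']}\n")
--
--         current_pos = page_end
--
--     # Add any remaining text after last processed page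
--     if current_pos < len(text_content):
--         result_parts.append(text_content[current_pos:])
--
--     return "".join(result_parts)
-- ===== SOURCE B (Python) =====
-- def _insert_placeholders_at_positions(text_content, page_texts, page_image_inserts):
--     if not page_image_inserts or all(not v for v in page_image_inserts.values()):
--         return text_content
--
--     # Stage 1: compute, for each page, the insertion point (page end, clamped to the
--     # text length) and the whole placeholder block for that page as one string.
--     inserts = []
--     pos = 0
--     for page_num, page_info in enumerate(page_texts, start=1):
--         pos += len(page_info["text"])
--         block = "".join(
--             "\n" + info["placeholder"] + "\n"
--             for info in page_image_inserts.get(page_num, [])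
--         )
--         inserts.append((min(pos, len(text_content)), block))
--
--     # Stage 2: splice the blocks into the full text back-to-front, so earlier
--     # insertion points stay valid; no per-page segmentation or parts list.
--     result = text_content
--     for p, block in reversed(inserts):
--         if block:
--             result = result[:p] + block + result[p:]
--     return result
-- ===== Notes on version B (the rewrite author's own statement) =====
-- stated objective: alternative
-- what changed: B never segments the text: it first builds a list of (clamped insertion offset, joined placeholder block) per page, then splices each block into the full text back-to-front with result[:p]+block+result[p:], instead of A's single pass that cuts the text into per-page slices collected in result_parts and joined at the end.
import Mathlib
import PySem

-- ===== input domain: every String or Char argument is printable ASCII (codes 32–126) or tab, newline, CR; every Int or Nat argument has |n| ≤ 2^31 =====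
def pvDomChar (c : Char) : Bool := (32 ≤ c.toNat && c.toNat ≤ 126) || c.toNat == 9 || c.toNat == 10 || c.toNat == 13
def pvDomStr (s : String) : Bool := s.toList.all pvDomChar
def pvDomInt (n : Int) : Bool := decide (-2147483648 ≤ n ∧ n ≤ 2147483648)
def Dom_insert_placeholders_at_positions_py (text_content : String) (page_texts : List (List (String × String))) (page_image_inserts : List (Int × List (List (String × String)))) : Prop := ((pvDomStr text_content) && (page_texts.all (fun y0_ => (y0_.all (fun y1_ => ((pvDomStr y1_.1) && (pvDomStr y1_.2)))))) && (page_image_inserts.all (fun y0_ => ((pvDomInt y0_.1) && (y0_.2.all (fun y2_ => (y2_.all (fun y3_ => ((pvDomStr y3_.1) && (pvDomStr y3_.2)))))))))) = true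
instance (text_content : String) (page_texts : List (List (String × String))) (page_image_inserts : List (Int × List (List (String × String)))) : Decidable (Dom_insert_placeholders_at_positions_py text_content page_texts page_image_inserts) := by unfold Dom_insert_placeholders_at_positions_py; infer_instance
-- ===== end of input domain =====

-- B replaces A's segment-and-join pass by a two-stage splice: compute per-page insertion
-- offsets and placeholder blocks, then insert the blocks into the intact text back-to-front
-- (objective: alternative algorithm, same behaviour).

-- ===== PORT A =====
-- "\n" + placeholder + "\n" for each insert dict of d[key] (formatting shared by both Pythons)
def pvPlaceholderParts (d : PySem.Dict Int (List (List (String × String)))) (key : Int) : List (List Char) :=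
  (d.getD key []).map (fun info => '\n' :: (((PySem.Dict.ofList info).getD "placeholder" "").toList ++ ['\n']))

-- len(p["text"]) (shared: A uses it per page, B's stage 1 uses it too)
def pvTlen (p : List (String × String)) : Nat := ((PySem.Dict.ofList p).getD "text" "").toList.length

-- A's 'for page_num, page_info in enumerate(page_texts)' loop: state = (result_parts, current_pos)
def pvALoop (s : List Char) (d : PySem.Dict Int (List (List (String × String)))) :
    List (List (String × String)) → Nat → Nat → List (List Char) → (List (List Char) × Nat)
  | [], _, pos, parts => (parts, pos)
  | p :: rest, i, pos, parts =>
      let ptext := ((PySem.Dict.ofList p).getD "text" "").toList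
      let pend := pos + ptext.length
      let parts1 := parts ++ [PySem.List.slice s (some (pos : Int)) (some (pend : Int))]
      let parts2 := if d.contains ((i : Int) + 1) then parts1 ++ pvPlaceholderParts d ((i : Int) + 1) else parts1
      pvALoop s d rest (i + 1) pend parts2

def insert_placeholders_at_positions_py (text_content : String) (page_texts : List (List (String × String))) (page_image_inserts : List (Int × List (List (String × String)))) : String :=
  let d := PySem.Dict.ofList page_image_inserts
  if d.items.isEmpty || d.values.all (fun v => v.isEmpty) then text_content
  else
    let s := text_content.toList
    let (parts, pos) := pvALoop s d page_texts 0 0 []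
    let parts := if pos < s.length then parts ++ [PySem.List.slice s (some (pos : Int)) none] else parts
    String.ofList (PySem.Chars.join [] parts)

-- ===== PORT B =====
-- one page's whole placeholder block: "".join("\n"+info["placeholder"]+"\n" for info in d.get(num, []))
def pvBlock (d : PySem.Dict Int (List (List (String × String)))) (key : Int) : List Char :=
  PySem.Chars.join [] (pvPlaceholderParts d key)

-- stage 1: 'for page_num, page_info in enumerate(page_texts, start=1)': build (min(pos, len), block)
def pvBuild (len : Nat) (d : PySem.Dict Int (List (List (String × String)))) :
    List (List (String × String)) → Nat → Nat → List (Nat × List Char)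
  | [], _, _ => []
  | p :: rest, num, pos =>
      let pos' := pos + pvTlen p
      (min pos' len, pvBlock d (num : Int)) :: pvBuild len d rest (num + 1) pos'

-- result[:p] + block + result[p:] (p is a nonnegative clamped offset, so take/drop is exact)
def pvIns (p : Nat) (b : List Char) (t : List Char) : List Char := t.take p ++ b ++ t.drop p

-- stage 2: 'for p, block in reversed(inserts): if block: result = result[:p]+block+result[p:]'
def pvSplice : List (Nat × List Char) → List Char → List Char
  | [], t => t
  | (p, b) :: rest, t =>
      let t' := pvSplice rest t
      if b.isEmpty then t' else pvIns p b t'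

def insert_placeholders_at_positions_py_alt (text_content : String) (page_texts : List (List (String × String))) (page_image_inserts : List (Int × List (List (String × String)))) : String :=
  let d := PySem.Dict.ofList page_image_inserts
  if d.items.isEmpty || d.values.all (fun v => v.isEmpty) then text_content
  else
    let s := text_content.toList
    let inserts := pvBuild s.length d page_texts 1 0
    String.ofList (pvSplice inserts s)

-- ===== PRECONDITION & SPEC =====
-- Pre_ excludes exactly the inputs where Python A (and B alike) raises KeyError: unless the early
-- return fires, every page dict must contain "text", and every insert dict actually looked up must
-- contain "placeholder".
def Pre_insert_placeholders_at_positions_py (text_content : String) (page_texts : List (List (String × String))) (page_image_inserts : List (Int × List (List (String × String)))) : Prop :=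
  ((PySem.Dict.ofList page_image_inserts).values.all (fun v => v.isEmpty)
   || ((page_texts.all fun p => (PySem.Dict.ofList p).contains "text")
       && (List.range page_texts.length).all fun i =>
            ((PySem.Dict.ofList page_image_inserts).getD ((i : Int) + 1) []).all fun info =>
              (PySem.Dict.ofList info).contains "placeholder")) = true
instance (text_content : String) (page_texts : List (List (String × String))) (page_image_inserts : List (Int × List (List (String × String)))) : Decidable (Pre_insert_placeholders_at_positions_py text_content page_texts page_image_inserts) := by unfold Pre_insert_placeholders_at_positions_py; infer_instance

def pvWitness_insert_placeholders_at_positions_py : String × (List (List (String × String))) × (List (Int × List (List (String × String)))) :=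
  ("ab", [[("text", "a")], [("text", "b")]], [(1, [[("placeholder", "IMG")]])])

def Spec_insert_placeholders_at_positions_py (text_content : String) (page_texts : List (List (String × String))) (page_image_inserts : List (Int × List (List (String × String)))) (out : String) : Prop := out = insert_placeholders_at_positions_py_alt text_content page_texts page_image_inserts
instance (text_content : String) (page_texts : List (List (String × String))) (page_image_inserts : List (Int × List (List (String × String)))) (out : String) : Decidable (Spec_insert_placeholders_at_positions_py text_content page_texts page_image_inserts out) := by unfold Spec_insert_placeholders_at_positions_py; infer_instance

-- ===== CLAIM (what is proved, stated in full; the proofs are below) =====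
def Claim_equal_insert_placeholders_at_positions_py : Prop := ∀ (text_content : String) (page_texts : List (List (String × String))) (page_image_inserts : List (Int × List (List (String × String)))), Dom_insert_placeholders_at_positions_py text_content page_texts page_image_inserts → Pre_insert_placeholders_at_positions_py text_content page_texts page_image_inserts → Spec_insert_placeholders_at_positions_py text_content page_texts page_image_inserts (insert_placeholders_at_positions_py text_content page_texts page_image_inserts)

-- ===== LEMMAS AND PROOFS =====

-- A-loop canonical list of parts (previous-attempt shape): per page, its slice then its placeholders
def pvCanon (s : List Char) (d : PySem.Dict Int (List (List (String × String)))) :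
    List (List (String × String)) → Nat → Nat → List (List Char)
  | [], _, _ => []
  | p :: rest, i, pos =>
      (PySem.List.slice s (some (pos : Int)) (some ((pos + pvTlen p : Nat) : Int))
        :: pvPlaceholderParts d ((i : Int) + 1)) ++ pvCanon s d rest (i + 1) (pos + pvTlen p)

def pvSum (l : List (List (String × String))) : Nat := (l.map pvTlen).sum

-- char-level canonical form shared by both sides: segments between consecutive positions + blocks
def pvCanonP (s : List Char) : List (Nat × List Char) → Nat → List Char
  | [], prev => s.drop prev
  | (p, b) :: rest, prev => (s.take p).drop prev ++ b ++ pvCanonP s rest p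

-- positions are nondecreasing and bounded by len
def pvMono (len : Nat) : List (Nat × List Char) → Prop
  | [] => True
  | (p, _) :: rest => p ≤ len ∧ (match rest with | [] => True | (q, _) :: _ => p ≤ q) ∧ pvMono len rest

theorem pvPlaceholderParts_of_not_contains (d : PySem.Dict Int (List (List (String × String)))) (k : Int)
    (h : d.contains k = false) : pvPlaceholderParts d k = [] := by
  simp [pvPlaceholderParts, PySem.Dict.getD_of_not_contains d [] h]

theorem pvALoop_eq_canon (s : List Char) (d : PySem.Dict Int (List (List (String × String)))) :
    ∀ (l : List (List (String × String))) (i pos : Nat) (parts : List (List Char)),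
      pvALoop s d l i pos parts = (parts ++ pvCanon s d l i pos, pos + pvSum l) := by
  intro l
  induction l with
  | nil => intro i pos parts; simp [pvALoop, pvCanon, pvSum]
  | cons p rest ih =>
      intro i pos parts
      simp only [pvALoop, pvCanon, ih, Prod.mk.injEq]
      refine ⟨?_, ?_⟩
      · by_cases h : d.contains ((i : Int) + 1) = true
        · simp [h, pvTlen]
        · simp only [Bool.not_eq_true] at h
          simp [h, pvPlaceholderParts_of_not_contains d _ h, pvTlen]
      · simp [pvSum, pvTlen]; omega

theorem pvTake_min (s : List Char) (n : Nat) : s.take (min n s.length) = s.take n := by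
  rcases Nat.le_total n s.length with h | h
  · rw [Nat.min_eq_left h]
  · rw [Nat.min_eq_right h, List.take_of_length_le h, List.take_of_length_le (le_refl _)]

theorem pvDrop_clamp (s : List Char) (l : List (Nat × List Char)) (q : Nat) :
    pvCanonP s l (min q s.length) = pvCanonP s l q := by
  rcases Nat.le_total q s.length with h | h
  · rw [Nat.min_eq_left h]
  · rw [Nat.min_eq_right h]
    cases l with
    | nil =>
        show s.drop s.length = s.drop q
        rw [List.drop_of_length_le (le_refl _), List.drop_of_length_le h]
    | cons pb rest =>
        obtain ⟨p, b⟩ := pb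
        simp only [pvCanonP]
        have h1 : (s.take p).length ≤ s.length := by
          rw [List.length_take]; omega
        rw [List.drop_of_length_le h1, List.drop_of_length_le (le_trans h1 h)]

-- slice s[pos:pend] = (take pend).drop pos (nonneg Nat bounds)
theorem pvSlice_take_drop (s : List Char) (pos pend : Nat) (_h : pos ≤ pend) :
    PySem.List.slice s (some (pos : Int)) (some (pend : Int)) = (s.take pend).drop pos := by
  rw [PySem.List.slice_natCast, List.drop_take]

-- "".join over char lists is flatten
theorem pvJoin_nil_eq_flatten : ∀ (l : List (List Char)), PySem.Chars.join [] l = l.flatten := by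
  intro l
  induction l with
  | nil => simp [PySem.Chars.join_nil]
  | cons a rest ih =>
      cases rest with
      | nil => simp [PySem.Chars.join_singleton]
      | cons b r =>
          rw [PySem.Chars.join_cons_cons, List.flatten_cons, ih]
          simp

theorem pvBlock_eq_flatten (d : PySem.Dict Int (List (List (String × String)))) (k : Int) :
    pvBlock d k = (pvPlaceholderParts d k).flatten := by
  rw [pvBlock, pvJoin_nil_eq_flatten]

-- L1: A's canonical parts, flattened and with the tail glued on, are the char-level canonical form
theorem pvCanon_to_canonP (s : List Char) (d : PySem.Dict Int (List (List (String × String)))) :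
    ∀ (l : List (List (String × String))) (i pos : Nat),
      (pvCanon s d l i pos).flatten ++ s.drop (pos + pvSum l)
        = pvCanonP s (pvBuild s.length d l (i + 1) pos) pos := by
  intro l
  induction l with
  | nil => intro i pos; simp [pvCanon, pvBuild, pvCanonP, pvSum]
  | cons p rest ih =>
      intro i pos
      simp only [pvCanon, pvBuild, pvCanonP, pvSum, List.map_cons, List.sum_cons,
        List.flatten_cons, List.flatten_append]
      rw [pvSlice_take_drop s pos (pos + pvTlen p) (by omega)]
      rw [← pvTake_min s (pos + pvTlen p)]
      rw [pvDrop_clamp]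
      have hkey : (((i + 1 : Nat) : Int)) = ((i : Int) + 1) := by push_cast; ring
      rw [hkey, pvBlock_eq_flatten]
      have hrec := ih (i + 1) (pos + pvTlen p)
      simp only [List.append_assoc]
      have harith : pos + (pvTlen p + (List.map pvTlen rest).sum) = pos + pvTlen p + pvSum rest := by
        simp only [pvSum]; omega
      rw [harith, hrec]

-- pvBuild produces monotone, clamped positions
theorem pvBuild_mono (len : Nat) (d : PySem.Dict Int (List (List (String × String)))) :
    ∀ (l : List (List (String × String))) (num pos : Nat), pvMono len (pvBuild len d l num pos) := by
  intro l
  induction l with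
  | nil => intro num pos; simp [pvBuild, pvMono]
  | cons p rest ih =>
      intro num pos
      simp only [pvBuild, pvMono]
      refine ⟨Nat.min_le_right _ _, ?_, ih (num + 1) (pos + pvTlen p)⟩
      cases rest with
      | nil => simp [pvBuild]
      | cons q r => simp only [pvBuild]; exact min_le_min (by omega) (le_refl _)

-- shift: a canonical form whose positions all lie at or beyond p starts with s.take p
theorem pvCanonP_shift (s : List Char) (l : List (Nat × List Char)) (p : Nat)
    (_hp : p ≤ s.length)
    (hhead : match l with | [] => True | (q, _) :: _ => p ≤ q) :
    pvCanonP s l 0 = s.take p ++ pvCanonP s l p := by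
  cases l with
  | nil =>
      simp only [pvCanonP, List.drop_zero]
      exact (List.take_append_drop p s).symm
  | cons qb rest =>
      obtain ⟨q, b⟩ := qb
      simp only [pvCanonP, List.drop_zero] at hhead ⊢
      rw [← List.append_assoc, ← List.append_assoc]
      congr 2
      have h1 : s.take p = (s.take q).take p := by rw [List.take_take, Nat.min_eq_left hhead]
      rw [h1]
      exact (List.take_append_drop p (s.take q)).symm

-- L2: the back-to-front splice of a monotone insert list is the canonical form
theorem pvSplice_eq_canonP (s : List Char) :
    ∀ (l : List (Nat × List Char)), pvMono s.length l → pvSplice l s = pvCanonP s l 0 := by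
  intro l
  induction l with
  | nil => intro _; simp [pvSplice, pvCanonP]
  | cons pb rest ih =>
      obtain ⟨p, b⟩ := pb
      intro hm
      obtain ⟨hple, hhead, hrest⟩ := hm
      have hshift := pvCanonP_shift s rest p hple hhead
      have hlen : (s.take p).length = p := List.length_take_of_le hple
      simp only [pvSplice, ih hrest, hshift]
      by_cases hb : b.isEmpty = true
      · have : b = [] := List.isEmpty_iff.mp hb
        subst this
        simp [pvCanonP]
      · simp only [hb, Bool.false_eq_true, if_false, pvIns]
        rw [List.take_left' hlen, List.drop_left' hlen]
        simp [pvCanonP]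

-- the conditional tail of A is just an unconditional clamped drop
theorem pvTail_eq_drop (s : List Char) (pos : Nat) :
    (if pos < s.length then [PySem.List.slice s (some (pos : Int)) none] else []).flatten
      = s.drop pos := by
  by_cases h : pos < s.length
  · simp [h, PySem.List.slice_from_natCast]
  · simp only [h, if_false, List.flatten_nil]
    rw [List.drop_of_length_le (by omega)]

theorem insert_placeholders_at_positions_py_eq_alt (text_content : String) (page_texts : List (List (String × String))) (page_image_inserts : List (Int × List (List (String × String)))) :
    insert_placeholders_at_positions_py text_content page_texts page_image_inserts
      = insert_placeholders_at_positions_py_alt text_content page_texts page_image_inserts := by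
  unfold insert_placeholders_at_positions_py insert_placeholders_at_positions_py_alt
  set d := PySem.Dict.ofList page_image_inserts
  by_cases hc : (d.items.isEmpty || d.values.all (fun v => v.isEmpty)) = true
  · simp [hc]
  · simp only [Bool.not_eq_true] at hc
    simp only [hc]
    set s := text_content.toList
    rw [pvALoop_eq_canon s d page_texts 0 0 []]
    simp only [List.nil_append]
    congr 1
    rw [pvJoin_nil_eq_flatten]
    rw [pvSplice_eq_canonP s _ (pvBuild_mono s.length d page_texts 1 0)]
    have hA := pvCanon_to_canonP s d page_texts 0 0
    rw [show (0 : Nat) + 1 = 1 from rfl] at hA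
    rw [← hA]
    have hsplit : (if 0 + pvSum page_texts < s.length
          then pvCanon s d page_texts 0 0 ++ [PySem.List.slice s (some ((0 + pvSum page_texts : Nat) : Int)) none]
          else pvCanon s d page_texts 0 0)
        = pvCanon s d page_texts 0 0
          ++ (if 0 + pvSum page_texts < s.length
              then [PySem.List.slice s (some ((0 + pvSum page_texts : Nat) : Int)) none] else []) := by
      split <;> simp
    rw [hsplit, List.flatten_append, pvTail_eq_drop]

-- ===== VERDICT (by name: the statement is the Claim_ definition above) =====
theorem insert_placeholders_at_positions_py_spec : Claim_equal_insert_placeholders_at_positions_py := by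
  intro tc pts pii _ _
  unfold Spec_insert_placeholders_at_positions_py
  exact insert_placeholders_at_positions_py_eq_alt tc pts pii
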